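-- pv_equiv track=rewrite | github.com/Rettend/civup | mods/test_luaevents.py | lines_after_last_match
-- ===== SOURCE A (Python) =====
-- def lines_after_last_match(lines: list[str], needle: str) -> list[str]:
--     """Return lines after the last line containing needle."""
--     last_index = -1
--     for index, line in enumerate(lines):
--         if needle in line:
--             last_index = index
--     if last_index < 0:
--         return lines
--     return lines[last_index + 1 :]
-- ===== SOURCE B (Python) =====
-- def lines_after_last_match(lines: list[str], needle: str) -> list[str]:
--     """Return lines after the last line containing needle (reverse scan, early exit)."""
--     for i in reversed(range(len(lines))):
--         if needle in lines[i]: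
--             return lines[i + 1:]
--     return lines
-- ===== Notes on version B (the rewrite author's own statement) =====
-- stated objective: idiomatic
-- what changed: Replaces the forward full scan that tracks the last matching index with a reverse iteration that returns lines[i+1:] at the first (i.e. last) match, terminating early instead of always scanning the whole list.
import Mathlib
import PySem

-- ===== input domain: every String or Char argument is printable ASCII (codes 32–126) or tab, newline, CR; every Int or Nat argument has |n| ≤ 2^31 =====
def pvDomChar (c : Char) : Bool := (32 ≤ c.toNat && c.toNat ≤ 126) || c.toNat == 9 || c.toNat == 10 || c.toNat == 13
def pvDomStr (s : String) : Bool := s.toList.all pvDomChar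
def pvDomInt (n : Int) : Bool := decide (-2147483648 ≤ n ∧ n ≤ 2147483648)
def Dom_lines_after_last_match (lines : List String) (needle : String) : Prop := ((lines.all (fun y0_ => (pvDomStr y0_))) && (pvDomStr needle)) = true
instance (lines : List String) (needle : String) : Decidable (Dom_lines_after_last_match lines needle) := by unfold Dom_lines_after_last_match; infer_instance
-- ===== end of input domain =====

-- B changes the traversal: a reverse scan with early return at the last match, instead of
-- A's forward scan tracking the last matching index (objective: idiomatic; return value only).

-- ===== PORT A =====
-- forward loop: last_index starts at -1, each matching enumerate index overwrites it
def lines_after_last_match (lines : List String) (needle : String) : List String :=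
  let last_index : Int :=
    (PySem.List.enumerate lines 0).foldl
      (fun acc p => if PySem.Str.isIn needle p.2 then p.1 else acc) (-1)
  if last_index < 0 then lines
  else PySem.List.slice lines (some (last_index + 1)) none

-- ===== PORT B =====
-- reverse scan over the indices; lines[i] for 0 ≤ i < len is List.getD, lines[i+1:] with
-- i+1 ≥ 0 is List.drop (both exact here since the index is in range and nonnegative)
def linesAltGo (lines : List String) (needle : String) : List Nat → List String
  | [] => lines
  | i :: rest =>
      if PySem.Str.isIn needle (lines.getD i "") then lines.drop (i + 1)
      else linesAltGo lines needle rest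

def lines_after_last_match_alt (lines : List String) (needle : String) : List String :=
  linesAltGo lines needle (List.range lines.length).reverse

-- ===== PRECONDITION & SPEC =====
def Spec_lines_after_last_match (lines : List String) (needle : String) (out : List String) : Prop := out = lines_after_last_match_alt lines needle
instance (lines : List String) (needle : String) (out : List String) : Decidable (Spec_lines_after_last_match lines needle out) := by unfold Spec_lines_after_last_match; infer_instance

-- ===== CLAIM (what is proved, stated in full; the proofs are below) =====
def Claim_equal_lines_after_last_match : Prop := ∀ (lines : List String) (needle : String), Dom_lines_after_last_match lines needle → Spec_lines_after_last_match lines needle (lines_after_last_match lines needle)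

-- ===== LEMMAS AND PROOFS =====

-- A's accumulated last_index stays below s + len when it starts there
theorem lines_foldl_lt (needle : String) :
    ∀ (xs : List String) (s init : Int), init < s + xs.length →
      (PySem.List.enumerate xs s).foldl
        (fun acc p => if PySem.Str.isIn needle p.2 then p.1 else acc) init < s + xs.length := by
  intro xs
  induction xs with
  | nil => intro s init h; simpa using h
  | cons y ys ih =>
      intro s init h
      simp only [PySem.List.enumerate_cons, List.foldl_cons, List.length_cons]
      have h' : (if PySem.Str.isIn needle y then s else init) < (s + 1) + (ys.length : Int) := by
        simp only [List.length_cons] at h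
        split <;> push_cast at h ⊢ <;> omega
      have := ih (s + 1) _ h'
      push_cast at this ⊢
      omega

theorem lines_A_append_singleton (xs : List String) (x needle : String) :
    lines_after_last_match (xs ++ [x]) needle =
      if PySem.Str.isIn needle x then []
      else lines_after_last_match xs needle ++ [x] := by
  unfold lines_after_last_match
  simp only [PySem.List.enumerate_append, List.foldl_append, PySem.List.enumerate_cons,
    PySem.List.enumerate_nil, List.foldl_cons, List.foldl_nil]
  by_cases hm : PySem.Str.isIn needle x
  · simp only [hm, if_true]
    rw [if_neg (by omega)]
    have : (0 : Int) + (xs.length : Int) + 1 = ((xs.length + 1 : Nat) : Int) := by push_cast; omega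
    rw [this, PySem.List.slice_from_natCast]
    simp
  · simp only [hm, Bool.false_eq_true, if_false]
    set li := (PySem.List.enumerate xs 0).foldl
        (fun acc p => if PySem.Str.isIn needle p.2 then p.1 else acc) (-1) with hli
    have hlt : li < (xs.length : Int) := by
      have := lines_foldl_lt needle xs 0 (-1) (by omega)
      simpa using this
    by_cases hneg : li < 0
    · simp [hneg]
    · rw [if_neg hneg, if_neg hneg]
      rw [not_lt] at hneg
      have hcast : li + 1 = ((li.toNat + 1 : Nat) : Int) := by omega
      rw [hcast, PySem.List.slice_from_natCast, PySem.List.slice_from_natCast,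
        List.drop_append_of_le_length (by omega)]

-- B on xs ++ [x], scanning only indices inside xs, appends [x] to the scan over xs
theorem linesAltGo_append_singleton (xs : List String) (x needle : String) :
    ∀ l : List Nat, (∀ i ∈ l, i < xs.length) →
      linesAltGo (xs ++ [x]) needle l = linesAltGo xs needle l ++ [x] := by
  intro l
  induction l with
  | nil => intro _; simp [linesAltGo]
  | cons i rest ih =>
      intro h
      have hi : i < xs.length := h i (List.mem_cons_self)
      simp only [linesAltGo, List.getD_eq_getElem?_getD,
        List.getElem?_append_left hi]
      split
      · rw [List.drop_append_of_le_length (by omega)]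
      · exact ih (fun j hj => h j (List.mem_cons_of_mem _ hj))

theorem lines_B_append_singleton (xs : List String) (x needle : String) :
    lines_after_last_match_alt (xs ++ [x]) needle =
      if PySem.Str.isIn needle x then []
      else lines_after_last_match_alt xs needle ++ [x] := by
  unfold lines_after_last_match_alt
  rw [List.length_append, List.length_singleton, List.range_succ, List.reverse_append]
  simp only [List.reverse_singleton, List.singleton_append, linesAltGo,
    List.getD_eq_getElem?_getD, List.getElem?_append_right (le_refl xs.length),
    Nat.sub_self]
  by_cases hm : PySem.Str.isIn needle x
  · have hc : PySem.Chars.isIn needle.toList x.toList = true := by simpa using hm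
    simp [hc]
  · simp only [List.getElem?_cons_zero, Option.getD_some, hm, Bool.false_eq_true, if_false]
    exact linesAltGo_append_singleton xs x needle _ (by simp [List.mem_reverse])

theorem lines_AB_eq (lines : List String) (needle : String) :
    lines_after_last_match lines needle = lines_after_last_match_alt lines needle := by
  induction lines using List.reverseRecOn with
  | nil => rfl
  | append_singleton xs x ih =>
      rw [lines_A_append_singleton, lines_B_append_singleton]
      split
      · rfl
      · rw [ih]

-- ===== VERDICT (by name: the statement is the Claim_ definition above) =====
theorem lines_after_last_match_spec : Claim_equal_lines_after_last_match :=
  fun lines needle _ => lines_AB_eq lines needle
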